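-- pv_equiv track=rewrite | github.com/inchrysi/EserciziPrep | aMATRICIana.py | manualSetIncreasingMatrix
-- ===== SOURCE A (Python) =====
-- def manualSetIncreasingMatrix(size):
--     m = []
--
--     for j in range(size):
--         l = []
--         for i in range(size):
--             l.append(i + (j * size))
--         m.append(l)
--
--     return m
-- ===== SOURCE B (Python) =====
-- def manualSetIncreasingMatrix(size):
--     n = max(size, 0)
--     flat = list(range(n * n))
--     return [flat[j * n:(j + 1) * n] for j in range(n)]
-- ===== Notes on version B (the rewrite author's own statement) =====
-- stated objective: simpler
-- what changed: Replaces the two nested append loops by one flat build of 0..size*size-1 followed by slicing it into size-length rows.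
import Mathlib
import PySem

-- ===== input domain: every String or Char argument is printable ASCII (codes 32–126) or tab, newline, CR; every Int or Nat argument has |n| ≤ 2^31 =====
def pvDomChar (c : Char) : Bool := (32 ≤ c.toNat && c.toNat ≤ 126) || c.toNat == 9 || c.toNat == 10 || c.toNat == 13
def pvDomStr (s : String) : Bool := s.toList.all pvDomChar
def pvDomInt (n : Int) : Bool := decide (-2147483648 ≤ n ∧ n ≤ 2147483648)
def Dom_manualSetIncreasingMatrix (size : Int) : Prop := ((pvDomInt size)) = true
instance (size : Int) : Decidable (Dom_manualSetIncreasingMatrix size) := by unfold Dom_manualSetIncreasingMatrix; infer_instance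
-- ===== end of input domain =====

-- B builds the values 0..size*size-1 once and slices that flat list into rows,
-- instead of A's two nested append loops; objective: simpler.

-- ===== PORT A =====
def manualSetIncreasingMatrix (size : Int) : List (List Int) :=
  (PySem.List.pyRange 0 size 1).foldl
    (fun m j =>
      m ++ [(PySem.List.pyRange 0 size 1).foldl (fun l i => l ++ [i + j * size]) []])
    []

-- ===== PORT B =====
def manualSetIncreasingMatrix_alt (size : Int) : List (List Int) :=
  let n := max size 0
  let flat := PySem.List.pyRange 0 (n * n) 1
  (PySem.List.pyRange 0 n 1).map
    (fun j => PySem.List.slice flat (some (j * n)) (some ((j + 1) * n)))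

-- ===== PRECONDITION & SPEC =====
def Spec_manualSetIncreasingMatrix (size : Int) (out : List (List Int)) : Prop := out = manualSetIncreasingMatrix_alt size
instance (size : Int) (out : List (List Int)) : Decidable (Spec_manualSetIncreasingMatrix size out) := by unfold Spec_manualSetIncreasingMatrix; infer_instance

-- ===== CLAIM (what is proved, stated in full; the proofs are below) =====
def Claim_equal_manualSetIncreasingMatrix : Prop := ∀ (size : Int), Dom_manualSetIncreasingMatrix size → Spec_manualSetIncreasingMatrix size (manualSetIncreasingMatrix size)

-- ===== LEMMAS AND PROOFS =====

-- a slice of range(0, n) with bounds 0 ≤ a ≤ b ≤ n is range(a, b)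
theorem slice_pyRange_zero (a b n : Int) (h0 : 0 ≤ a) (hab : a ≤ b) (hbn : b ≤ n) :
    PySem.List.slice (PySem.List.pyRange 0 n 1) (some a) (some b) = PySem.List.pyRange a b 1 := by
  rw [PySem.List.slice_toNat _ h0 (le_trans h0 hab)]
  rw [PySem.List.pyRange_one_append 0 a n h0 (le_trans hab hbn)]
  have hla : (PySem.List.pyRange 0 a 1).length = a.toNat := by
    rw [PySem.List.length_pyRange_one]; omega
  rw [List.drop_left' hla]
  rw [PySem.List.pyRange_one_append a b n hab hbn]
  have hlb : (PySem.List.pyRange a b 1).length = b.toNat - a.toNat := by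
    rw [PySem.List.length_pyRange_one]; omega
  rw [List.take_left' hlb]

theorem row_eq (size j : Int) (h0 : 0 ≤ j) (hj : j < size) :
    (PySem.List.pyRange 0 size 1).foldl (fun l i => l ++ [i + j * size]) [] =
      PySem.List.slice (PySem.List.pyRange 0 (size * size) 1) (some (j * size)) (some ((j + 1) * size)) := by
  have hsz : 0 < size := lt_of_le_of_lt h0 hj
  rw [slice_pyRange_zero (j * size) ((j + 1) * size) (size * size)
      (mul_nonneg h0 hsz.le)
      (by nlinarith)
      (by nlinarith)]
  rw [PySem.List.foldl_append_singleton_eq_map]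
  rw [PySem.List.pyRange_one, PySem.List.pyRange_one]
  have : ((j + 1) * size - j * size) = size := by ring
  rw [this]
  simp only [List.nil_append, List.map_map, sub_zero]
  exact List.map_congr_left (fun k _ => by simp only [Function.comp_apply]; ring)

-- ===== VERDICT (by name: the statement is the Claim_ definition above) =====
theorem manualSetIncreasingMatrix_spec : Claim_equal_manualSetIncreasingMatrix := by
  intro size _
  unfold Spec_manualSetIncreasingMatrix manualSetIncreasingMatrix manualSetIncreasingMatrix_alt
  by_cases h : 0 ≤ size
  · rw [max_eq_left h]
    rw [PySem.List.foldl_append_singleton_eq_map, List.nil_append]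
    exact List.map_congr_left (fun j hj => by
      have := (PySem.List.mem_pyRange_one).1 hj
      exact row_eq size j this.1 this.2)
  · rw [max_eq_right (by omega : size ≤ 0)]
    rw [PySem.List.pyRange_one_eq_nil (by omega : size ≤ 0)]
    simp [PySem.List.pyRange_one_eq_nil (le_refl (0:Int))]
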